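-- pv_equiv track=rewrite | github.com/jing07140680/adder | ddpg-plus/genusg.py | genrow
-- ===== SOURCE A (Python) =====
-- def genrow(record):
--     res = []
--     cnt = 0
--     for i in range(1,len(record)):
--         if record[i] != 0:
--             res.append((cnt+record[i])*60000)
--             cnt += 60
--         else:
--             cnt += 60
--     return res
-- ===== SOURCE B (Python) =====
-- def genrow(record):
--     # cnt is always 60*(i-1) before index i, so compute each term from the index directly
--     return [(60 * (i - 1) + record[i]) * 60000
--             for i in range(1, len(record)) if record[i] != 0]
-- ===== Notes on version B (the rewrite author's own statement) =====
-- stated objective: simpler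
-- what changed: The running accumulator cnt (incremented by 60 in both branches) is eliminated: its value before index i is exactly 60*(i-1), so B builds the result as a single stateless list comprehension computing each term from the index.
import Mathlib
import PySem

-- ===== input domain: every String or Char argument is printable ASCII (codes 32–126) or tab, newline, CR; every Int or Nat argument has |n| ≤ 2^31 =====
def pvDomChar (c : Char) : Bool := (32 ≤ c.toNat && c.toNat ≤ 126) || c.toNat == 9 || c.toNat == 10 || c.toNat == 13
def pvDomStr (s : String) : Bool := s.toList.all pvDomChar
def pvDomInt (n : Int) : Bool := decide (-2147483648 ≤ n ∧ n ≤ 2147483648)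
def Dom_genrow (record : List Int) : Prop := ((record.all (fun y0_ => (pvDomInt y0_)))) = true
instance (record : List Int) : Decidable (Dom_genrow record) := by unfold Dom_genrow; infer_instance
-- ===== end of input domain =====

-- B replaces A's running counter cnt with the closed form 60*(i-1), yielding a stateless list comprehension (simpler, same cost).


-- ===== PORT A =====
def genrow (record : List Int) : List Int :=
  ((PySem.List.pyRange 1 record.length 1).foldl
    (fun (st : List Int × Int) i =>
      if PySem.List.pyGetD record i 0 ≠ 0 then
        (st.1 ++ [(st.2 + PySem.List.pyGetD record i 0) * 60000], st.2 + 60)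
      else
        (st.1, st.2 + 60)) ([], 0)).1

-- ===== PORT B =====
def genrow_alt (record : List Int) : List Int :=
  (PySem.List.pyRange 1 record.length 1).filterMap
    (fun i =>
      if PySem.List.pyGetD record i 0 ≠ 0 then
        some ((60 * (i - 1) + PySem.List.pyGetD record i 0) * 60000)
      else none)

-- ===== PRECONDITION & SPEC =====
def Spec_genrow (record : List Int) (out : List Int) : Prop := out = genrow_alt record
instance (record : List Int) (out : List Int) : Decidable (Spec_genrow record out) := by unfold Spec_genrow; infer_instance

-- ===== CLAIM (what is proved, stated in full; the proofs are below) =====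
def Claim_equal_genrow : Prop := ∀ (record : List Int), Dom_genrow record → Spec_genrow record (genrow record)

-- ===== LEMMAS AND PROOFS =====

-- Loop invariant: starting the fold at index a with cnt = 60*(a-1), the fold appends
-- exactly the filterMap of the remaining range to the accumulated result.
theorem genrow_loop (record : List Int) (a : Int) (res : List Int) :
    ((PySem.List.pyRange a record.length 1).foldl
      (fun (st : List Int × Int) i =>
        if PySem.List.pyGetD record i 0 ≠ 0 then
          (st.1 ++ [(st.2 + PySem.List.pyGetD record i 0) * 60000], st.2 + 60)
        else
          (st.1, st.2 + 60)) (res, 60 * (a - 1))).1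
    = res ++ (PySem.List.pyRange a record.length 1).filterMap
        (fun i =>
          if PySem.List.pyGetD record i 0 ≠ 0 then
            some ((60 * (i - 1) + PySem.List.pyGetD record i 0) * 60000)
          else none) := by
  by_cases h : a < (record.length : Int)
  · have hlt : ((record.length : Int) - a).toNat > 0 := by omega
    -- strong induction on the remaining length
    induction hn : ((record.length : Int) - a).toNat generalizing a res with
    | zero => omega
    | succ n ih =>
      rw [PySem.List.pyRange_one_cons h]
      simp only [List.foldl_cons, List.filterMap_cons]
      have hcnt : (60 : Int) * (a - 1) + 60 = 60 * ((a + 1) - 1) := by ring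
      by_cases hv : PySem.List.pyGetD record a 0 ≠ 0
      · simp only [if_pos hv]
        by_cases h2 : a + 1 < (record.length : Int)
        · rw [hcnt, ih (a + 1) _ h2 (by omega) (by omega)]
          simp [List.append_assoc]
        · rw [PySem.List.pyRange_one_eq_nil (by omega)]
          simp
      · simp only [if_neg hv]
        by_cases h2 : a + 1 < (record.length : Int)
        · rw [hcnt, ih (a + 1) _ h2 (by omega) (by omega)]
        · rw [PySem.List.pyRange_one_eq_nil (by omega)]
          simp
  · rw [PySem.List.pyRange_one_eq_nil (by omega)]
    simp

-- ===== VERDICT (by name: the statement is the Claim_ definition above) =====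
theorem genrow_spec : Claim_equal_genrow := by
  intro record _
  unfold Spec_genrow genrow genrow_alt
  have h := genrow_loop record 1 []
  simpa using h
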